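-- pv_equiv track=rewrite | github.com/spine-tools/Spine-Database-API | spinedb_api/dataframes.py | _expand_ids_recursive
-- ===== SOURCE A (Python) =====
-- IdToIdListMap = dict[int, list[int]]
--
-- def _expand_ids_recursive(entity_id: int, element_map: IdToIdListMap) -> list[int]:
--     expanded = []
--     for element_id in element_map[entity_id]:
--         if element_id not in element_map:
--             expanded.append(element_id)
--             continue
--         expanded.extend(_expand_ids_recursive(element_id, element_map))
--     return expanded
-- ===== SOURCE B (Python) =====
-- def _expand_ids_recursive(entity_id, element_map):
--     expanded = []
--     stack = list(reversed(element_map[entity_id]))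
--     while stack:
--         element_id = stack.pop()
--         if element_id not in element_map:
--             expanded.append(element_id)
--         else:
--             stack.extend(reversed(element_map[element_id]))
--     return expanded
-- ===== Notes on version B (the rewrite author's own statement) =====
-- stated objective: alternative
-- what changed: Replaces the recursive preorder expansion by an iterative explicit-stack DFS: children are pushed in reversed order onto a stack and popped left-to-right, accumulating leaves in one loop with no recursion.
import Mathlib
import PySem

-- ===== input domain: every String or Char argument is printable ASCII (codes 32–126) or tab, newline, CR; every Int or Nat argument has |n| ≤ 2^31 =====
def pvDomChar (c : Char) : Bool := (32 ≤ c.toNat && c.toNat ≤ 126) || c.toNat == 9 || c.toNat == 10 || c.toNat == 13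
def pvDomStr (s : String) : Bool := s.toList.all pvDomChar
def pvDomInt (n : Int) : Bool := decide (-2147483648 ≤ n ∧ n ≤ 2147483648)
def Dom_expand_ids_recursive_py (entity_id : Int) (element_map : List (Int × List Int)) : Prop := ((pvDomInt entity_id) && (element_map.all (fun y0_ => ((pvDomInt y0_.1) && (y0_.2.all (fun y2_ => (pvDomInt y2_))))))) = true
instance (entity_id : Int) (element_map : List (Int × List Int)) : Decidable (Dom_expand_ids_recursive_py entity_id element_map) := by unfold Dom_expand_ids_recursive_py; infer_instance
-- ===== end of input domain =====

-- B replaces A's recursion by an iterative explicit-stack DFS (children pushed reversed, popped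
-- left-to-right); same return value, no speed claim (objective: alternative decomposition).

-- ===== PORT A =====
-- children list of an id (element_map[id], defaulting to [] for non-keys; the KeyError of the
-- top-level subscript is excluded by Pre_ below)
def pvCh (element_map : List (Int × List Int)) (id : Int) : List Int :=
  (PySem.Dict.mk element_map).getD id []

-- A's recursion is not structural (it re-enters the same map), so the port carries a fuel
-- argument; Pre_ guarantees the recursion depth is below element_map.length + 1 (keys along a
-- descent path are distinct when no reachable cycle exists), so the fuel never runs out on Pre_.
def pyARec (element_map : List (Int × List Int)) : Nat → Int → List Int
  | 0, _ => []
  | f+1, entity_id =>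
      ((PySem.Dict.mk element_map).getD entity_id []).foldl
        (fun expanded element_id =>
          if ((PySem.Dict.mk element_map).get? element_id) = none
          then expanded ++ [element_id]
          else expanded ++ pyARec element_map f element_id)
        []

def expand_ids_recursive_py (entity_id : Int) (element_map : List (Int × List Int)) : List Int :=
  pyARec element_map (element_map.length + 1) entity_id

-- ===== PORT B =====
-- iteration budget for B's loop: one pop per node of the expansion tree, which has fewer than
-- (1 + total number of child entries) ^ (element_map.length + 2) nodes on Pre_ inputs
def pvFuelB (element_map : List (Int × List Int)) : Nat :=
  (1 + (element_map.flatMap (·.2)).length) ^ (element_map.length + 2)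

-- the Python stack (pop from the right, children pushed reversed) is modeled head-as-top:
-- popping = taking the head, pushing reversed children = prepending the children list
def pyBLoop (element_map : List (Int × List Int)) : Nat → List Int → List Int → List Int
  | _, [], expanded => expanded
  | 0, _ :: _, expanded => expanded
  | f+1, element_id :: stack, expanded =>
      if ((PySem.Dict.mk element_map).get? element_id) = none
      then pyBLoop element_map f stack (expanded ++ [element_id])
      else pyBLoop element_map f (((PySem.Dict.mk element_map).getD element_id []) ++ stack) expanded

def expand_ids_recursive_py_alt (entity_id : Int) (element_map : List (Int × List Int)) : List Int :=
  pyBLoop element_map (pvFuelB element_map) ((PySem.Dict.mk element_map).getD entity_id []) []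

-- ===== PRECONDITION & SPEC =====
-- one saturation step of the computable reachability closure: add every child of a member
def pvStep (element_map : List (Int × List Int)) (S : List Int) : List Int :=
  (S.flatMap (pvCh element_map)).foldl PySem.Set.add S

def pvClosure (element_map : List (Int × List Int)) : Nat → List Int → List Int
  | 0, S => S
  | n+1, S => pvClosure element_map n (pvStep element_map S)

-- enough saturation steps to reach every reachable id
def pvN (element_map : List (Int × List Int)) : Nat := (element_map.flatMap (·.2)).length + 1

-- Pre_ excludes exactly the inputs where the Python A raises: a missing entity_id (KeyError)
-- and maps with a cycle reachable from entity_id (RecursionError).  Reachability is stated via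
-- pvClosure, the saturated set of ids reachable from a start set by repeatedly adding children —
-- a shape property of the input graph itself, not a run of either port's algorithm (neither
-- port computes reachable sets).
def Pre_expand_ids_recursive_py (entity_id : Int) (element_map : List (Int × List Int)) : Prop :=
  ((PySem.Dict.mk element_map).get? entity_id).isSome = true ∧
  ∀ k ∈ pvClosure element_map (pvN element_map) (PySem.Set.ofList [entity_id]),
    k ∉ pvClosure element_map (pvN element_map) (PySem.Set.ofList (pvCh element_map k))

instance (entity_id : Int) (element_map : List (Int × List Int)) : Decidable (Pre_expand_ids_recursive_py entity_id element_map) := by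
  unfold Pre_expand_ids_recursive_py; infer_instance

def pvWitness_expand_ids_recursive_py : Int × (List (Int × List Int)) := (1, [(1, [2, 5]), (2, [3, 4])])

def Spec_expand_ids_recursive_py (entity_id : Int) (element_map : List (Int × List Int)) (out : List Int) : Prop := out = expand_ids_recursive_py_alt entity_id element_map
instance (entity_id : Int) (element_map : List (Int × List Int)) (out : List Int) : Decidable (Spec_expand_ids_recursive_py entity_id element_map out) := by unfold Spec_expand_ids_recursive_py; infer_instance

-- ===== CLAIM (what is proved, stated in full; the proofs are below) =====
def Claim_equal_expand_ids_recursive_py : Prop := ∀ (entity_id : Int) (element_map : List (Int × List Int)), Dom_expand_ids_recursive_py entity_id element_map → Pre_expand_ids_recursive_py entity_id element_map → Spec_expand_ids_recursive_py entity_id element_map (expand_ids_recursive_py entity_id element_map)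

-- ===== LEMMAS AND PROOFS =====

-- ---------- proof-side definitions ----------

-- the edge relation of the element map: b is a child of a
def pvR (m : List (Int × List Int)) (a b : Int) : Prop := b ∈ pvCh m a

def pvReach (m : List (Int × List Int)) : Int → Int → Prop := Relation.ReflTransGen (pvR m)

-- no cycle is reachable from id
def pvNoCyc (m : List (Int × List Int)) (id : Int) : Prop :=
  ∀ k, pvReach m id k → ∀ c ∈ pvCh m k, ¬ pvReach m c k

-- the allowed-set a contains every key reachable from id
def pvGoodFor (m : List (Int × List Int)) (id : Int) (a : List Int) : Prop :=
  ∀ k, pvReach m id k → ((PySem.Dict.mk m).get? k).isSome = true → k ∈ a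

def pvKeys (m : List (Int × List Int)) : List Int := m.map Prod.fst
def pvFlat (m : List (Int × List Int)) : List Int := m.flatMap (·.2)

-- preorder list of ALL nodes of the expansion tree, made total by shrinking an allowed-set
def pvVisit (m : List (Int × List Int)) (allowed : List Int) (id : Int) : List Int :=
  match (PySem.Dict.mk m).get? id with
  | none => [id]
  | some cs =>
      if h : id ∈ allowed then id :: cs.flatMap (fun c => pvVisit m (allowed.erase id) c)
      else [id]
termination_by allowed.length
decreasing_by
  have := List.length_erase_of_mem h
  have := List.length_pos_of_mem h
  omega

-- its leaves, in order
def pvLeaves (m : List (Int × List Int)) (allowed : List Int) (id : Int) : List Int :=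
  (pvVisit m allowed id).filter (fun c => decide ((PySem.Dict.mk m).get? c = none))

-- ---------- generic list/set lemmas ----------

theorem pv_mem_foldl_add (xs : List Int) (S : List Int) (x : Int) :
    x ∈ xs.foldl PySem.Set.add S ↔ x ∈ S ∨ x ∈ xs := by
  induction xs generalizing S with
  | nil => simp
  | cons y ys ih =>
      simp only [List.foldl_cons, ih, List.mem_cons]
      rw [PySem.Set.mem_add]
      tauto

theorem pv_foldl_add_append (xs : List Int) (S : List Int) :
    ∃ t, xs.foldl PySem.Set.add S = S ++ t := by
  induction xs generalizing S with
  | nil => exact ⟨[], (List.append_nil S).symm⟩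
  | cons y ys ih =>
      simp only [List.foldl_cons]
      rcases ih (PySem.Set.add S y) with ⟨t, ht⟩
      by_cases h : y ∈ S
      · refine ⟨t, ?_⟩; rw [ht]; simp [PySem.Set.add, h]
      · refine ⟨y :: t, ?_⟩; rw [ht]; simp [PySem.Set.add, h]

theorem pv_nodup_foldl_add (xs : List Int) (S : List Int) (h : S.Nodup) :
    (xs.foldl PySem.Set.add S).Nodup := by
  induction xs generalizing S with
  | nil => exact h
  | cons y ys ih => exact ih _ (PySem.Set.nodup_add _ _ h)

-- children lists live inside pvFlat
theorem pv_get?_length_le (m : List (Int × List Int)) (id : Int) (cs : List Int)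
    (h : (PySem.Dict.mk m).get? id = some cs) : cs.length ≤ (pvFlat m).length := by
  induction m with
  | nil => simp [PySem.Dict.get?] at h
  | cons p rest ih =>
      rw [PySem.Dict.get?_mk_cons] at h
      by_cases hk : p.1 == id
      · rw [if_pos hk] at h
        cases h
        simp only [pvFlat, List.flatMap_cons, List.length_append]
        omega
      · rw [if_neg hk] at h
        have := ih h
        simp only [pvFlat, List.flatMap_cons, List.length_append] at *
        omega

theorem pv_ch_subset_flat (m : List (Int × List Int)) (a c : Int) (h : c ∈ pvCh m a) :
    c ∈ pvFlat m := by
  have key : ∀ (mm : List (Int × List Int)) (cs : List Int), (PySem.Dict.mk mm).get? a = some cs → ∀ x ∈ cs, x ∈ pvFlat mm := by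
    intro mm
    induction mm with
    | nil => intro cs h; simp [PySem.Dict.get?] at h
    | cons p rest ih =>
        intro cs h x hx
        rw [PySem.Dict.get?_mk_cons] at h
        by_cases hk : p.1 == a
        · rw [if_pos hk] at h
          cases h
          simp [pvFlat, List.mem_flatMap]
          exact Or.inl hx
        · rw [if_neg hk] at h
          have := ih cs h x hx
          simp only [pvFlat, List.flatMap_cons, List.mem_append] at *
          tauto
  unfold pvCh at h
  rw [PySem.Dict.getD_eq_get?_getD] at h
  cases hg : (PySem.Dict.mk m).get? a with
  | none => rw [hg] at h; simp at h
  | some cs =>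
      rw [hg] at h; simp only [Option.getD_some] at h
      exact key m cs hg c h

theorem pv_key_mem_keys (m : List (Int × List Int)) (k : Int)
    (h : ((PySem.Dict.mk m).get? k).isSome = true) : k ∈ pvKeys m := by
  induction m with
  | nil => simp [PySem.Dict.get?] at h
  | cons p rest ih =>
      rw [PySem.Dict.get?_mk_cons] at h
      by_cases hk : p.1 == k
      · simp only [pvKeys, List.map_cons, List.mem_cons]
        left
        exact (LawfulBEq.eq_of_beq hk).symm
      · rw [if_neg hk] at h
        have := ih h
        simp only [pvKeys, List.map_cons, List.mem_cons] at *
        tauto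

-- ---------- closure lemmas ----------

theorem pv_mem_step (m : List (Int × List Int)) (S : List Int) (x : Int) :
    x ∈ pvStep m S ↔ x ∈ S ∨ ∃ s ∈ S, x ∈ pvCh m s := by
  unfold pvStep
  rw [pv_mem_foldl_add]
  simp [List.mem_flatMap]

theorem pv_subset_step (m : List (Int × List Int)) (S : List Int) : S ⊆ pvStep m S := by
  intro x hx
  rw [pv_mem_step]
  exact Or.inl hx

theorem pv_closure_add (m : List (Int × List Int)) (a b : Nat) (S : List Int) :
    pvClosure m (a + b) S = pvClosure m b (pvClosure m a S) := by
  induction a generalizing S with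
  | zero => rw [Nat.zero_add]; rfl
  | succ a ih =>
      have h1 : a + 1 + b = (a + b) + 1 := by omega
      rw [h1]
      exact ih (pvStep m S)

theorem pv_closure_succ (m : List (Int × List Int)) (n : Nat) (S : List Int) :
    pvClosure m (n + 1) S = pvStep m (pvClosure m n S) := by
  rw [pv_closure_add m n 1 S]
  rfl

theorem pv_subset_closure (m : List (Int × List Int)) (n : Nat) (S : List Int) :
    S ⊆ pvClosure m n S := by
  induction n generalizing S with
  | zero => exact fun x hx => hx
  | succ n ih => exact fun x hx => ih (pvStep m S) (pv_subset_step m S hx)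

theorem pv_closure_fix (m : List (Int × List Int)) (n : Nat) (S : List Int)
    (h : pvStep m S = S) : pvClosure m n S = S := by
  induction n with
  | zero => rfl
  | succ n ih =>
      show pvClosure m n (pvStep m S) = S
      rw [h]
      exact ih

theorem pv_nodup_closure (m : List (Int × List Int)) (n : Nat) (S : List Int) (h : S.Nodup) :
    (pvClosure m n S).Nodup := by
  induction n generalizing S with
  | zero => exact h
  | succ n ih => exact ih (pvStep m S) (pv_nodup_foldl_add _ _ h)

theorem pv_closure_subset_univ (m : List (Int × List Int)) (n : Nat) (S : List Int) :
    ∀ x ∈ pvClosure m n S, x ∈ S ++ pvFlat m := by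
  induction n generalizing S with
  | zero => intro x hx; exact List.mem_append.mpr (Or.inl hx)
  | succ n ih =>
      intro x hx
      have hx2 := ih (pvStep m S) x hx
      rcases List.mem_append.mp hx2 with h1 | h1
      · rcases (pv_mem_step m S x).mp h1 with h2 | ⟨s, _, h3⟩
        · exact List.mem_append.mpr (Or.inl h2)
        · exact List.mem_append.mpr (Or.inr (pv_ch_subset_flat m s x h3))
      · exact List.mem_append.mpr (Or.inr h1)

-- saturation: after pvN m steps the closure is a fixpoint
theorem pv_saturated (m : List (Int × List Int)) (S : List Int) (h : S.Nodup) :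
    pvStep m (pvClosure m (pvN m) S) = pvClosure m (pvN m) S := by
  by_cases hex : ∃ k, k < pvN m ∧ pvStep m (pvClosure m k S) = pvClosure m k S
  · rcases hex with ⟨k, hk, hfix⟩
    have h1 : pvClosure m (pvN m) S = pvClosure m k S := by
      have h2 : pvN m = k + (pvN m - k) := by omega
      rw [h2, pv_closure_add m k (pvN m - k) S, pv_closure_fix m (pvN m - k) _ hfix]
    rw [h1]
    exact hfix
  · exfalso
    have hex' : ∀ k, k < pvN m → pvStep m (pvClosure m k S) ≠ pvClosure m k S :=
      fun k hk hfix => hex ⟨k, hk, hfix⟩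
    have grow : ∀ k, k ≤ pvN m → S.length + k ≤ (pvClosure m k S).length := by
      intro k
      induction k with
      | zero => intro _; simp [pvClosure]
      | succ k ih =>
          intro hk
          have hk' : k < pvN m := by omega
          have h1 := ih (by omega)
          rcases pv_foldl_add_append ((pvClosure m k S).flatMap (pvCh m)) (pvClosure m k S) with ⟨t, ht⟩
          have hstep : pvStep m (pvClosure m k S) = pvClosure m k S ++ t := ht
          have hne := hex' k hk'
          have htne : t ≠ [] := by
            intro h0
            rw [h0, List.append_nil] at hstep
            exact hne hstep
          have : 1 ≤ t.length := by
            cases t with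
            | nil => exact absurd rfl htne
            | cons a b => simp
          rw [pv_closure_succ, hstep, List.length_append]
          omega
    have big := grow (pvN m) le_rfl
    have nod := pv_nodup_closure m (pvN m) S h
    have sub := pv_closure_subset_univ m (pvN m) S
    have hle : (pvClosure m (pvN m) S).length ≤ S.length + (pvFlat m).length := by
      have h1 : (pvClosure m (pvN m) S).toFinset.card = (pvClosure m (pvN m) S).length :=
        List.toFinset_card_of_nodup nod
      have h2 : (pvClosure m (pvN m) S).toFinset ⊆ (S ++ pvFlat m).toFinset := by
        intro x hx
        rw [List.mem_toFinset] at *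
        exact sub x hx
      have h3 := Finset.card_le_card h2
      have h4 := List.toFinset_card_le (S ++ pvFlat m)
      rw [List.length_append] at h4
      omega
    unfold pvN at big
    unfold pvN pvFlat at hle
    omega

-- completeness of the computable closure
theorem pv_closure_complete (m : List (Int × List Int)) (S : List Int) (s x : Int)
    (hS : S.Nodup) (hs : s ∈ S) (hr : pvReach m s x) : x ∈ pvClosure m (pvN m) S := by
  have hfix := pv_saturated m S hS
  have closed : ∀ a b, a ∈ pvClosure m (pvN m) S → b ∈ pvCh m a → b ∈ pvClosure m (pvN m) S := by
    intro a b ha hb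
    rw [← hfix, pv_mem_step]
    exact Or.inr ⟨a, ha, hb⟩
  have start : s ∈ pvClosure m (pvN m) S := pv_subset_closure m (pvN m) S hs
  induction hr with
  | refl => exact start
  | tail _ hbc ih => exact closed _ _ ih hbc

-- Pre_ gives relational acyclicity from the entity
theorem pv_pre_nocyc (entity_id : Int) (m : List (Int × List Int))
    (h : Pre_expand_ids_recursive_py entity_id m) : pvNoCyc m entity_id := by
  intro k hreach c hc hcr
  have h1 : k ∈ pvClosure m (pvN m) (PySem.Set.ofList [entity_id]) :=
    pv_closure_complete m _ entity_id k (PySem.Set.nodup_ofList _)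
      ((PySem.Set.mem_ofList _ _).mpr (List.mem_singleton.mpr rfl)) hreach
  have h2 : k ∈ pvClosure m (pvN m) (PySem.Set.ofList (pvCh m k)) :=
    pv_closure_complete m _ c k (PySem.Set.nodup_ofList _)
      ((PySem.Set.mem_ofList _ _).mpr hc) hcr
  exact h.2 k h1 h2

-- ---------- reachability transfer ----------


theorem pv_nocyc_child (m : List (Int × List Int)) (a c : Int) (h : pvNoCyc m a)
    (hc : c ∈ pvCh m a) : pvNoCyc m c := by
  intro k hr
  exact h k (Relation.ReflTransGen.head hc hr)

theorem pv_goodfor_self (m : List (Int × List Int)) (id : Int) (a : List Int)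
    (h : pvGoodFor m id a) (hk : ((PySem.Dict.mk m).get? id).isSome = true) : id ∈ a := by
  exact h id Relation.ReflTransGen.refl hk

theorem pv_goodfor_child (m : List (Int × List Int)) (id c : Int) (a : List Int)
    (hn : pvNoCyc m id) (hg : pvGoodFor m id a) (hc : c ∈ pvCh m id) :
    pvGoodFor m c (a.erase id) := by
  intro k hr hk
  have hka : k ∈ a := hg k (Relation.ReflTransGen.head hc hr) hk
  have hne : k ≠ id := fun he => hn id Relation.ReflTransGen.refl c hc (he ▸ hr)
  exact (List.mem_erase_of_ne hne).mpr hka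

theorem pv_goodfor_keys (m : List (Int × List Int)) (id : Int) : pvGoodFor m id (pvKeys m) := by
  intro k _ hk
  exact pv_key_mem_keys m k hk

theorem pv_flatMap_congr (l : List Int) (f g : Int → List Int)
    (h : ∀ x ∈ l, f x = g x) : l.flatMap f = l.flatMap g := by
  induction l with
  | nil => rfl
  | cons a t ih =>
      rw [List.flatMap_cons, List.flatMap_cons, h a (List.mem_cons_self), ih (fun x hx => h x (List.mem_cons_of_mem a hx))]

theorem pv_ch_eq (m : List (Int × List Int)) (id : Int) (cs : List Int)
    (h : (PySem.Dict.mk m).get? id = some cs) : pvCh m id = cs := by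
  unfold pvCh
  rw [PySem.Dict.getD_eq_get?_getD, h]
  rfl

-- ---------- pvVisit lemmas ----------

theorem pv_visit_none (m : List (Int × List Int)) (al : List Int) (id : Int)
    (hq : (PySem.Dict.mk m).get? id = none) : pvVisit m al id = [id] := by
  rw [pvVisit, hq]

theorem pv_visit_key (m : List (Int × List Int)) (al : List Int) (id : Int) (cs : List Int)
    (hq : (PySem.Dict.mk m).get? id = some cs) (hmem : id ∈ al) :
    pvVisit m al id = id :: cs.flatMap (fun c => pvVisit m (al.erase id) c) := by
  rw [pvVisit, hq]
  simp [hmem]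

theorem pv_visit_notmem (m : List (Int × List Int)) (al : List Int) (id : Int) (cs : List Int)
    (hq : (PySem.Dict.mk m).get? id = some cs) (hmem : id ∉ al) :
    pvVisit m al id = [id] := by
  rw [pvVisit, hq]
  simp [hmem]

theorem pv_getD_eq (m : List (Int × List Int)) (id : Int) (cs : List Int)
    (hq : (PySem.Dict.mk m).get? id = some cs) :
    (PySem.Dict.mk m).getD id [] = cs := by
  rw [PySem.Dict.getD_eq_get?_getD, hq]
  rfl

theorem pv_filter_flatMap (l : List Int) (f : Int → List Int) (p : Int → Bool) :
    (l.flatMap f).filter p = l.flatMap (fun x => (f x).filter p) := by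
  induction l with
  | nil => rfl
  | cons a t ih => rw [List.flatMap_cons, List.flatMap_cons, List.filter_append, ih]

theorem pv_sum_le (l : List Nat) (b : Nat) (h : ∀ x ∈ l, x ≤ b) : l.sum ≤ l.length * b := by
  induction l with
  | nil => simp
  | cons a t ih =>
      rw [List.sum_cons, List.length_cons]
      have h1 := h a (List.mem_cons_self)
      have h2 := ih (fun x hx => h x (List.mem_cons_of_mem a hx))
      calc a + t.sum ≤ b + t.length * b := Nat.add_le_add h1 h2
        _ = (t.length + 1) * b := by ring


theorem pv_visit_len_pos (m : List (Int × List Int)) (a : List Int) (id : Int) :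
    0 < (pvVisit m a id).length := by
  rw [pvVisit]
  split
  · simp
  · split
    · simp
    · simp

theorem pv_visit_irrel (m : List (Int × List Int)) (n : Nat) :
    ∀ (a1 a2 : List Int) (id : Int), a1.length ≤ n → a2.length ≤ n → pvNoCyc m id →
    pvGoodFor m id a1 → pvGoodFor m id a2 → pvVisit m a1 id = pvVisit m a2 id := by
  induction n with
  | zero =>
      intro a1 a2 id hlen1 hlen2 hn hg1 hg2
      cases hq : (PySem.Dict.mk m).get? id with
      | none => rw [pv_visit_none m a1 id hq, pv_visit_none m a2 id hq]
      | some cs =>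
          exfalso
          have hk : ((PySem.Dict.mk m).get? id).isSome = true := by rw [hq]; rfl
          have h1 : id ∈ a1 := pv_goodfor_self m id a1 hg1 hk
          have := List.length_pos_of_mem h1
          omega
  | succ n ih =>
      intro a1 a2 id hlen1 hlen2 hn hg1 hg2
      cases hq : (PySem.Dict.mk m).get? id with
      | none => rw [pv_visit_none m a1 id hq, pv_visit_none m a2 id hq]
      | some cs =>
          have hk : ((PySem.Dict.mk m).get? id).isSome = true := by rw [hq]; rfl
          have h1 : id ∈ a1 := pv_goodfor_self m id a1 hg1 hk
          have h2 : id ∈ a2 := pv_goodfor_self m id a2 hg2 hk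
          rw [pv_visit_key m a1 id cs hq h1, pv_visit_key m a2 id cs hq h2]
          congr 1
          apply pv_flatMap_congr
          intro c hc
          have hch : c ∈ pvCh m id := by rw [pv_ch_eq m id cs hq]; exact hc
          have hL1 : (a1.erase id).length ≤ n := by
            have := List.length_erase_of_mem h1
            have := List.length_pos_of_mem h1
            omega
          have hL2 : (a2.erase id).length ≤ n := by
            have := List.length_erase_of_mem h2
            have := List.length_pos_of_mem h2
            omega
          exact ih (a1.erase id) (a2.erase id) c hL1 hL2 (pv_nocyc_child m id c hn hch)
            (pv_goodfor_child m id c a1 hn hg1 hch) (pv_goodfor_child m id c a2 hn hg2 hch)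

theorem pv_visit_len_bound (m : List (Int × List Int)) (n : Nat) :
    ∀ (a : List Int) (id : Int), a.length ≤ n →
    (pvVisit m a id).length ≤ (1 + (pvFlat m).length) ^ (a.length + 1) := by
  induction n with
  | zero =>
      intro a id hlen
      have ha : a = [] := List.length_eq_zero_iff.mp (Nat.le_zero.mp hlen)
      subst ha
      cases hq : (PySem.Dict.mk m).get? id with
      | none =>
          rw [pv_visit_none m [] id hq]
          simpa using Nat.one_le_pow _ (1 + (pvFlat m).length) (by omega)
      | some cs =>
          rw [pv_visit_notmem m [] id cs hq (List.not_mem_nil)]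
          simpa using Nat.one_le_pow _ (1 + (pvFlat m).length) (by omega)
  | succ n ih =>
      intro a id hlen
      cases hq : (PySem.Dict.mk m).get? id with
      | none =>
          rw [pv_visit_none m a id hq]
          simpa using Nat.one_le_pow _ (1 + (pvFlat m).length) (by omega)
      | some cs =>
          by_cases hmem : id ∈ a
          · rw [pv_visit_key m a id cs hq hmem]
            have hT : cs.length ≤ (pvFlat m).length := pv_get?_length_le m id cs hq
            have hel : (a.erase id).length = a.length - 1 := List.length_erase_of_mem hmem
            have hpos := List.length_pos_of_mem hmem
            have hlen' : (a.erase id).length ≤ n := by omega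
            have hbound : ∀ x ∈ (cs.map (fun c => (pvVisit m (a.erase id) c).length)),
                x ≤ (1 + (pvFlat m).length) ^ a.length := by
              intro x hx
              rcases List.mem_map.mp hx with ⟨c, _, hc⟩
              have := ih (a.erase id) c hlen'
              rw [← hc]
              have he : (a.erase id).length + 1 ≤ a.length := by omega
              calc (pvVisit m (a.erase id) c).length
                  ≤ (1 + (pvFlat m).length) ^ ((a.erase id).length + 1) := this
                _ ≤ (1 + (pvFlat m).length) ^ a.length :=
                    Nat.pow_le_pow_right (by omega) he
            have hsum := pv_sum_le _ _ hbound
            rw [List.length_cons, List.length_flatMap]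
            have hlm : (cs.map (fun c => (pvVisit m (a.erase id) c).length)).length = cs.length :=
              List.length_map _
            set X := (1 + (pvFlat m).length) ^ a.length with hX
            have hX1 : 1 ≤ X := Nat.one_le_pow _ _ (by omega)
            have hpow : (1 + (pvFlat m).length) ^ (a.length + 1) = X * (1 + (pvFlat m).length) := by
              rw [hX, pow_succ]
            rw [hpow]
            have : (cs.map (fun c => (pvVisit m (a.erase id) c).length)).sum ≤ cs.length * X := by
              rw [← hlm]; exact hsum
            nlinarith [this, hT, hX1]
          · rw [pv_visit_notmem m a id cs hq hmem]
            simpa using Nat.one_le_pow _ (1 + (pvFlat m).length) (by omega)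

-- key node: leaves = concatenation of the children's leaves
theorem pv_leaves_key (m : List (Int × List Int)) (a : List Int) (id : Int) (cs : List Int)
    (h : (PySem.Dict.mk m).get? id = some cs) (ha : id ∈ a) :
    pvLeaves m a id = cs.flatMap (fun c => pvLeaves m (a.erase id) c) := by
  unfold pvLeaves
  rw [pv_visit_key m a id cs h ha]
  rw [List.filter_cons]
  have : (decide ((PySem.Dict.mk m).get? id = none)) = false := by
    simp [h]
  rw [this]
  simp only [Bool.false_eq_true, if_false]
  exact pv_filter_flatMap cs _ _

theorem pv_leaves_erase (m : List (Int × List Int)) (a : List Int) (id c : Int)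
    (hn : pvNoCyc m id) (hg : pvGoodFor m id a) (hc : c ∈ pvCh m id) :
    pvLeaves m (a.erase id) c = pvLeaves m a c := by
  unfold pvLeaves
  congr 1
  cases hq : (PySem.Dict.mk m).get? c with
  | none => rw [pv_visit_none m _ c hq, pv_visit_none m _ c hq]
  | some cs =>
      apply pv_visit_irrel m (a.length) _ _ c List.length_erase_le le_rfl
        (pv_nocyc_child m id c hn hc)
        (pv_goodfor_child m id c a hn hg hc)
      intro k hr hk
      exact hg k (Relation.ReflTransGen.head hc hr) hk

-- ---------- loop bridging helpers ----------

theorem pv_foldlA (m : List (Int × List Int)) (f : Nat) (cs acc : List Int) :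
    cs.foldl (fun expanded element_id =>
      if ((PySem.Dict.mk m).get? element_id) = none
      then expanded ++ [element_id]
      else expanded ++ pyARec m f element_id) acc
    = acc ++ cs.flatMap (fun e =>
        if ((PySem.Dict.mk m).get? e) = none then [e] else pyARec m f e) := by
  induction cs generalizing acc with
  | nil => simp
  | cons e t ih =>
      rw [List.foldl_cons, List.flatMap_cons]
      by_cases h : (PySem.Dict.mk m).get? e = none
      · rw [if_pos h, ih, if_pos h]; simp
      · rw [if_neg h, ih, if_neg h]; simp

theorem pv_loopB_nil (m : List (Int × List Int)) (f : Nat) (acc : List Int) :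
    pyBLoop m f [] acc = acc := by
  cases f <;> rfl

theorem pv_loopB_leaf (m : List (Int × List Int)) (f : Nat) (e : Int) (st acc : List Int)
    (h : (PySem.Dict.mk m).get? e = none) :
    pyBLoop m (f+1) (e::st) acc = pyBLoop m f st (acc ++ [e]) := by
  simp only [pyBLoop]
  rw [if_pos h]

theorem pv_loopB_key (m : List (Int × List Int)) (f : Nat) (e : Int) (st acc : List Int)
    (h : ¬ (PySem.Dict.mk m).get? e = none) :
    pyBLoop m (f+1) (e::st) acc = pyBLoop m f ((PySem.Dict.mk m).getD e [] ++ st) acc := by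
  simp only [pyBLoop]
  rw [if_neg h]

-- ---------- port A vs pvLeaves ----------

theorem pv_lemA (m : List (Int × List Int)) (n : Nat) :
    ∀ (a : List Int) (f : Nat) (id : Int), a.length ≤ n →
    ((PySem.Dict.mk m).get? id).isSome = true → pvNoCyc m id → pvGoodFor m id a →
    a.length < f → pyARec m f id = pvLeaves m a id := by
  induction n with
  | zero =>
      intro a f id hlen hk hn hg hf
      exfalso
      have := List.length_pos_of_mem (pv_goodfor_self m id a hg hk)
      omega
  | succ n ih =>
      intro a f id hlen hk hn hg hf
      rcases Option.isSome_iff_exists.mp hk with ⟨cs, hq⟩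
      cases f with
      | zero => omega
      | succ f' =>
          have hmem : id ∈ a := pv_goodfor_self m id a hg hk
          simp only [pyARec]
          rw [pv_getD_eq m id cs hq, pv_foldlA, List.nil_append]
          rw [pv_leaves_key m a id cs hq hmem]
          apply pv_flatMap_congr
          intro c hc
          have hch : c ∈ pvCh m id := by rw [pv_ch_eq m id cs hq]; exact hc
          by_cases h : (PySem.Dict.mk m).get? c = none
          · rw [if_pos h]
            unfold pvLeaves
            rw [pv_visit_none m _ c h]
            simp [h]
          · rw [if_neg h]
            have hk' : ((PySem.Dict.mk m).get? c).isSome = true := by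
              cases hcc : (PySem.Dict.mk m).get? c
              · exact absurd hcc h
              · rfl
            have hel := List.length_erase_of_mem hmem
            have hpos := List.length_pos_of_mem hmem
            exact ih (a.erase id) f' c (by omega) hk' (pv_nocyc_child m id c hn hch)
              (pv_goodfor_child m id c a hn hg hch) (by omega)

-- ---------- port B vs pvLeaves ----------

theorem pv_lemB (m : List (Int × List Int)) (f : Nat) :
    ∀ (stack acc : List Int), (∀ c ∈ stack, pvNoCyc m c) →
    (stack.map (fun c => (pvVisit m (pvKeys m) c).length)).sum ≤ f →
    pyBLoop m f stack acc = acc ++ stack.flatMap (fun c => pvLeaves m (pvKeys m) c) := by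
  induction f with
  | zero =>
      intro stack acc h hsum
      cases stack with
      | nil => rw [pv_loopB_nil]; simp
      | cons c rest =>
          exfalso
          have := pv_visit_len_pos m (pvKeys m) c
          rw [List.map_cons, List.sum_cons] at hsum
          omega
  | succ f ih =>
      intro stack acc h hsum
      cases stack with
      | nil => rw [pv_loopB_nil]; simp
      | cons c rest =>
          rw [List.map_cons, List.sum_cons] at hsum
          have hnc : pvNoCyc m c := h c (List.mem_cons_self)
          have hrest : ∀ x ∈ rest, pvNoCyc m x := fun x hx => h x (List.mem_cons_of_mem c hx)
          by_cases hq : (PySem.Dict.mk m).get? c = none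
          · rw [pv_loopB_leaf m f c rest acc hq]
            have hvp := pv_visit_len_pos m (pvKeys m) c
            rw [ih rest (acc ++ [c]) hrest (by omega)]
            rw [List.flatMap_cons]
            have hl : pvLeaves m (pvKeys m) c = [c] := by
              unfold pvLeaves
              rw [pv_visit_none m _ c hq]
              simp [hq]
            rw [hl]
            simp
          · rcases Option.ne_none_iff_exists'.mp hq with ⟨cs, hcs⟩
            have hk : ((PySem.Dict.mk m).get? c).isSome = true := by rw [hcs]; rfl
            have hmem : c ∈ pvKeys m := pv_key_mem_keys m c hk
            rw [pv_loopB_key m f c rest acc hq, pv_getD_eq m c cs hcs]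
            have hchild : ∀ x ∈ cs, x ∈ pvCh m c := by
              intro x hx; rw [pv_ch_eq m c cs hcs]; exact hx
            have hvis := pv_visit_key m (pvKeys m) c cs hcs hmem
            have hveq : cs.map (fun x => (pvVisit m ((pvKeys m).erase c) x).length)
                = cs.map (fun x => (pvVisit m (pvKeys m) x).length) := by
              apply List.map_congr_left
              intro x hx
              congr 1
              cases hq2 : (PySem.Dict.mk m).get? x with
              | none => rw [pv_visit_none m _ x hq2, pv_visit_none m _ x hq2]
              | some ds =>
                  exact pv_visit_irrel m (pvKeys m).length _ _ x List.length_erase_le le_rfl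
                    (pv_nocyc_child m c x hnc (hchild x hx))
                    (pv_goodfor_child m c x (pvKeys m) hnc (pv_goodfor_keys m c) (hchild x hx))
                    (pv_goodfor_keys m x)
            have hlen : (pvVisit m (pvKeys m) c).length
                = (cs.map (fun x => (pvVisit m (pvKeys m) x).length)).sum + 1 := by
              rw [hvis, List.length_cons, List.length_flatMap, hveq]
            have hcsn : ∀ x ∈ cs, pvNoCyc m x := fun x hx =>
              pv_nocyc_child m c x hnc (hchild x hx)
            have hall : ∀ x ∈ cs ++ rest, pvNoCyc m x := by
              intro x hx
              rcases List.mem_append.mp hx with h1 | h1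
              · exact hcsn x h1
              · exact hrest x h1
            have hsum2 : ((cs ++ rest).map (fun x => (pvVisit m (pvKeys m) x).length)).sum ≤ f := by
              rw [List.map_append, List.sum_append]
              omega
            rw [ih (cs ++ rest) acc hall hsum2]
            rw [List.flatMap_append, List.flatMap_cons]
            have hlc : pvLeaves m (pvKeys m) c = cs.flatMap (fun x => pvLeaves m (pvKeys m) x) := by
              rw [pv_leaves_key m (pvKeys m) c cs hcs hmem]
              apply pv_flatMap_congr
              intro x hx
              exact pv_leaves_erase m (pvKeys m) c x hnc (pv_goodfor_keys m c) (hchild x hx)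
            rw [hlc]



-- ===== VERDICT (by name: the statement is the Claim_ definition above) =====
theorem expand_ids_recursive_py_spec : Claim_equal_expand_ids_recursive_py := by
  intro entity_id m _ hpre
  unfold Spec_expand_ids_recursive_py
  rcases Option.isSome_iff_exists.mp hpre.1 with ⟨cs, hq⟩
  have hn : pvNoCyc m entity_id := pv_pre_nocyc entity_id m hpre
  have hkeylen : (pvKeys m).length = m.length := List.length_map _
  have hmem : entity_id ∈ pvKeys m := pv_key_mem_keys m entity_id hpre.1
  have hchild : ∀ x ∈ cs, x ∈ pvCh m entity_id := by
    intro x hx; rw [pv_ch_eq m entity_id cs hq]; exact hx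
  have hA : expand_ids_recursive_py entity_id m = pvLeaves m (pvKeys m) entity_id := by
    unfold expand_ids_recursive_py
    exact pv_lemA m (pvKeys m).length (pvKeys m) (m.length + 1) entity_id le_rfl hpre.1 hn
      (pv_goodfor_keys m entity_id) (by omega)
  have hT : cs.length ≤ (pvFlat m).length := pv_get?_length_le m entity_id cs hq
  have hfuel : (cs.map (fun x => (pvVisit m (pvKeys m) x).length)).sum ≤ pvFuelB m := by
    have hb : ∀ y ∈ cs.map (fun x => (pvVisit m (pvKeys m) x).length),
        y ≤ (1 + (pvFlat m).length) ^ (m.length + 1) := by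
      intro y hy
      rcases List.mem_map.mp hy with ⟨x, _, hx⟩
      rw [← hx]
      have := pv_visit_len_bound m (pvKeys m).length (pvKeys m) x le_rfl
      rw [hkeylen] at this
      exact this
    have hsum := pv_sum_le _ _ hb
    rw [List.length_map] at hsum
    have hfb : pvFuelB m = (1 + (pvFlat m).length) ^ (m.length + 1) * (1 + (pvFlat m).length) := by
      show (1 + (pvFlat m).length) ^ (m.length + 2) = _
      rw [pow_succ]
    rw [hfb]
    have hX1 : 1 ≤ (1 + (pvFlat m).length) ^ (m.length + 1) := Nat.one_le_pow _ _ (by omega)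
    nlinarith [hsum, hT, hX1]
  have hB : expand_ids_recursive_py_alt entity_id m
      = cs.flatMap (fun x => pvLeaves m (pvKeys m) x) := by
    unfold expand_ids_recursive_py_alt
    rw [pv_getD_eq m entity_id cs hq]
    rw [pv_lemB m (pvFuelB m) cs []
      (fun x hx => pv_nocyc_child m entity_id x hn (hchild x hx)) hfuel]
    simp
  rw [hA, hB]
  rw [pv_leaves_key m (pvKeys m) entity_id cs hq hmem]
  apply pv_flatMap_congr
  intro x hx
  exact pv_leaves_erase m (pvKeys m) entity_id x hn (pv_goodfor_keys m entity_id) (hchild x hx)
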